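-- pv_equiv track=rewrite | github.com/pypi-data/pypi-mirror-12 | packages/aioxmpp/aioxmpp-0.3.tar.gz/aioxmpp-0.3/aioxmpp/entitycaps/service.py | build_identities_string
-- ===== SOURCE A (Python) =====
-- def build_identities_string(identities):
--     identities = [
--         "/".join(
--             str(part) if part is not None else ""
--             for part in identity
--         )
--         for identity in identities
--     ]
--
--     if len(set(identities)) != len(identities):
--         raise ValueError("duplicate identity")
--
--     identities.sort()
--     identities.append("")
--     return "<".join(identities)
-- ===== SOURCE B (Python) =====
-- def _insert_unique(sorted_ids, joined):
--     """Insert joined into the sorted list, raising on an equal element."""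
--     for i in range(len(sorted_ids)):
--         s = sorted_ids[i]
--         if s == joined:
--             raise ValueError("duplicate identity")
--         if joined < s:
--             return sorted_ids[:i] + [joined] + sorted_ids[i:]
--     return sorted_ids + [joined]
--
--
-- def build_identities_string(identities):
--     sorted_ids = []
--     for identity in identities:
--         joined = "/".join(
--             str(part) if part is not None else ""
--             for part in identity
--         )
--         sorted_ids = _insert_unique(sorted_ids, joined)
--     out = ""
--     for s in sorted_ids:
--         out = out + s + "<"
--     return out
-- ===== Notes on version B (the rewrite author's own statement) =====
-- stated objective: alternative
-- what changed: Replaces A's three staged passes (build all joined strings, set-based duplicate test, library sort, join) by a single incremental pass: each joined identity is inserted into a sorted accumulator by ordered insertion, which detects a duplicate the moment an equal element is met, and the result string is built by concatenating each element plus '<' instead of calling join.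
import Mathlib
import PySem

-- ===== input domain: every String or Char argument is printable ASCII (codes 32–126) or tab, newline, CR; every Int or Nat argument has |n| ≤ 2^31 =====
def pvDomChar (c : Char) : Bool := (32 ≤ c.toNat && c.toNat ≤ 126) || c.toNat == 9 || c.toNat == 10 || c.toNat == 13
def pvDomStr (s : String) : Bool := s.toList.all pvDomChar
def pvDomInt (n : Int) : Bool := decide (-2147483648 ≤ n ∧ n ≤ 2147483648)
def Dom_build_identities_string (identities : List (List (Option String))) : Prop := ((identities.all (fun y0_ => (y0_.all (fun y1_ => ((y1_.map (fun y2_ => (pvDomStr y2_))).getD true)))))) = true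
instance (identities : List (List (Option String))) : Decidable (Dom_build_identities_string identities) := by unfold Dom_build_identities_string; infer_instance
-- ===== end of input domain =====

-- B replaces A's staged passes (build all joined strings, set-based duplicate test,
-- library sort, "<"-join) by one incremental pass: ordered insertion into a sorted
-- accumulator that detects a duplicate at insertion time, then string concatenation.
-- Alternative decomposition; on duplicate inputs both Pythons raise (outside Pre_).

-- ===== PORT A =====
-- "/".join(str(part) if part is not None else "" for part in identity)
def pvJoinIdentity (identity : List (Option String)) : String :=
  PySem.Str.join "/" (identity.map (fun part => match part with | some s => s | none => ""))

def build_identities_string (identities : List (List (Option String))) : String :=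
  let ids := identities.map pvJoinIdentity
  if (PySem.Set.ofList ids).length ≠ ids.length then
    ""  -- raise ValueError("duplicate identity"): excluded by Pre_
  else
    PySem.Str.join "<" (PySem.List.sorted ids (fun x => x) false ++ [""])

-- ===== PORT B =====
-- _insert_unique: the early-return loop over the sorted list as structural recursion;
-- none = the raise ValueError("duplicate identity") (excluded by Pre_)
def pvInsertUnique : List String → String → Option (List String)
  | [], joined => some [joined]
  | s :: rest, joined =>
    if s = joined then none
    else if joined < s then some (joined :: s :: rest)
    else (pvInsertUnique rest joined).map (s :: ·)

def build_identities_string_alt (identities : List (List (Option String))) : String :=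
  match identities.foldl
      (fun acc identity => acc.bind (fun l => pvInsertUnique l (pvJoinIdentity identity)))
      (some []) with
  | none => ""  -- raise ValueError("duplicate identity"): excluded by Pre_
  | some sorted_ids => sorted_ids.foldl (fun out s => out ++ s ++ "<") ""

-- ===== PRECONDITION & SPEC =====
-- Pre_ excludes exactly the inputs whose "/"-joined identities contain a duplicate:
-- there both Pythons raise ValueError("duplicate identity") and return nothing.
def Pre_build_identities_string (identities : List (List (Option String))) : Prop :=
  (identities.map pvJoinIdentity).Nodup

instance (identities : List (List (Option String))) : Decidable (Pre_build_identities_string identities) := by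
  unfold Pre_build_identities_string; infer_instance

def pvWitness_build_identities_string : List (List (Option String)) :=
  [[some "client", none, some "pc"], [some "server"]]

def Spec_build_identities_string (identities : List (List (Option String))) (out : String) : Prop := out = build_identities_string_alt identities
instance (identities : List (List (Option String))) (out : String) : Decidable (Spec_build_identities_string identities out) := by unfold Spec_build_identities_string; infer_instance

-- ===== CLAIM (what is proved, stated in full; the proofs are below) =====
def Claim_equal_build_identities_string : Prop := ∀ (identities : List (List (Option String))), Dom_build_identities_string identities → Pre_build_identities_string identities → Spec_build_identities_string identities (build_identities_string identities)

-- ===== LEMMAS AND PROOFS =====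

-- ordered insertion of a fresh element succeeds and yields a sorted rearrangement
theorem pvInsertUnique_some (l : List String) (x : String)
    (hl : l.Pairwise (· < ·)) (hx : x ∉ l) :
    ∃ l', pvInsertUnique l x = some l' ∧ l'.Perm (x :: l) ∧ l'.Pairwise (· < ·) := by
  induction l with
  | nil => exact ⟨[x], rfl, List.Perm.refl _, by simp⟩
  | cons s rest ih =>
    have hne : s ≠ x := fun e => hx (e ▸ List.mem_cons_self ..)
    rcases List.pairwise_cons.mp hl with ⟨hsl, hrest⟩
    by_cases hlt : x < s
    · refine ⟨x :: s :: rest, by simp [pvInsertUnique, hne, hlt], List.Perm.refl _, ?_⟩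
      refine List.pairwise_cons.mpr ⟨?_, hl⟩
      intro y hy
      rcases List.mem_cons.mp hy with rfl | hy
      · exact hlt
      · exact lt_trans hlt (hsl y hy)
    · rcases ih hrest (fun h => hx (List.mem_cons_of_mem _ h)) with ⟨l', hins, hperm, hsorted⟩
      refine ⟨s :: l', by simp [pvInsertUnique, hne, hlt, hins], ?_, ?_⟩
      · exact (hperm.cons s).trans (List.Perm.swap x s rest)
      · refine List.pairwise_cons.mpr ⟨?_, hsorted⟩
        intro y hy
        rcases List.mem_cons.mp (hperm.mem_iff.mp hy) with rfl | hy
        · exact lt_of_le_of_ne (not_lt.mp hlt) hne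
        · exact hsl y hy

-- the fold inserting the remaining joined ids keeps the accumulator some, sorted, a permutation
theorem pvFold_ins (ids : List String) (l : List String)
    (hl : l.Pairwise (· < ·)) (hnd : (l ++ ids).Nodup) :
    ∃ l', ids.foldl (fun acc j => acc.bind (fun t => pvInsertUnique t j)) (some l) = some l'
      ∧ l'.Perm (l ++ ids) ∧ l'.Pairwise (· < ·) := by
  induction ids generalizing l with
  | nil => exact ⟨l, rfl, by simp, hl⟩
  | cons j rest ih =>
    have hjl : j ∉ l := fun h => List.disjoint_of_nodup_append hnd h (List.mem_cons_self ..)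
    rcases pvInsertUnique_some l j hl hjl with ⟨l1, hins, hperm1, hsort1⟩
    have hnd1 : (l1 ++ rest).Nodup :=
      (((hperm1.append_right rest).trans List.perm_middle.symm).nodup_iff).mpr hnd
    rcases ih l1 hsort1 hnd1 with ⟨l', hfold, hperm', hsort'⟩
    refine ⟨l', by simpa [hins] using hfold, ?_, hsort'⟩
    exact hperm'.trans ((hperm1.append_right rest).trans List.perm_middle.symm)

-- string concatenation of s ++ "<" over a list equals "<".join(list + [""])
theorem pvFold_concat (l : List String) (out : String) :
    l.foldl (fun out s => out ++ s ++ "<") out = out ++ PySem.Str.join "<" (l ++ [""]) := by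
  induction l generalizing out with
  | nil =>
    apply String.toList_inj.mp
    simp [PySem.Str.toList_join, PySem.Chars.join_singleton]
  | cons a t ih =>
    simp only [List.foldl_cons, ih, List.cons_append]
    apply String.toList_inj.mp
    cases t with
    | nil =>
      simp [PySem.Str.toList_join, String.toList_append,
        PySem.Chars.join_cons_cons, PySem.Chars.join_singleton]
    | cons b r =>
      simp [PySem.Str.toList_join, String.toList_append, PySem.Chars.join_cons_cons]

-- ===== VERDICT (by name: the statement is the Claim_ definition above) =====
theorem build_identities_string_spec : Claim_equal_build_identities_string := by
  intro identities _ hpre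
  unfold Spec_build_identities_string build_identities_string build_identities_string_alt
  have hset : PySem.Set.ofList (identities.map pvJoinIdentity) = identities.map pvJoinIdentity :=
    PySem.Set.ofList_eq_self_of_nodup _ hpre
  rcases pvFold_ins (identities.map pvJoinIdentity) [] (by simp) (by simpa using hpre) with
    ⟨l', hfold, hperm, hsort⟩
  rw [List.foldl_map] at hfold
  have hsorted_eq :
      PySem.List.sorted (identities.map pvJoinIdentity) (fun x => x) false = l' :=
    PySem.List.sorted_eq_of_perm_of_pairwise_lt _ _ _ hperm hsort
  simp only [hset, ne_eq, not_true_eq_false, if_false, hfold, hsorted_eq,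
    pvFold_concat]
  apply String.toList_inj.mp
  simp
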